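-- pv_equiv track=rewrite | github.com/kykyn100/GB_Python | Основы языка Python/Lesson_3/5.py | sum_input
-- ===== SOURCE A (Python) =====
-- def sum_input(user_input):
--     sub_total = 0
--     for i in user_input:
--         if i.isdigit():
--             sub_total += int(i)
--         else:
--             return sub_total, 1
--     return sub_total, 0
-- ===== SOURCE B (Python) =====
-- def sum_input(user_input):
--     # Find the boundary index k of the leading digit prefix, then sum that
--     # slice and derive the flag from whether the prefix covers the whole input.
--     n = len(user_input)
--     k = 0
--     while k < n and user_input[k].isdigit():
--         k += 1
--     return sum(int(c) for c in user_input[:k]), (0 if k == n else 1)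
-- ===== Notes on version B (the rewrite author's own statement) =====
-- stated objective: alternative
-- what changed: A accumulates a running sum inside one loop with an early return carrying the flag; B first computes the boundary index of the leading digit prefix, then sums that slice, and derives the flag from comparing the boundary with the input length.
import Mathlib
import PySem

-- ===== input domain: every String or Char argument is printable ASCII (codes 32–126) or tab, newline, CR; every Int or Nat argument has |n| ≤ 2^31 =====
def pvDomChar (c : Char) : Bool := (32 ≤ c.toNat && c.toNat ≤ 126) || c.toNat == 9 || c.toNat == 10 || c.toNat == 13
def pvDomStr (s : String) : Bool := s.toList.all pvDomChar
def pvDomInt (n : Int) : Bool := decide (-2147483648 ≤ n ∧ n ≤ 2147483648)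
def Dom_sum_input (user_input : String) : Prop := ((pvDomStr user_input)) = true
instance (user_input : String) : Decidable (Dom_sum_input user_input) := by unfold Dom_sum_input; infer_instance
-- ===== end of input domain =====

-- B computes the digit-prefix boundary first, then sums the slice; A folds one loop with an early return.

-- ===== PORT A =====
-- int(i) for a char passing isdigit (ASCII '0'..'9' on this domain) is exactly its code minus 48.
def sumInputLoop (acc : Int) : List Char → Int × Int
  | [] => (acc, 0)
  | c :: rest =>
      if PySem.Chars.isdigit c then sumInputLoop (acc + ((c.toNat : Int) - 48)) rest
      else (acc, 1)

def sum_input (user_input : String) : Int × Int :=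
  sumInputLoop 0 user_input.toList

-- ===== PORT B =====
-- boundary index k of the leading digit prefix (Source B's while loop)
def digitBoundary : List Char → Nat
  | [] => 0
  | c :: rest => if PySem.Chars.isdigit c then digitBoundary rest + 1 else 0

def sum_input_alt (user_input : String) : Int × Int :=
  let l := user_input.toList
  let n := l.length
  let k := digitBoundary l
  ((l.take k).foldl (fun s c => s + ((c.toNat : Int) - 48)) 0, if k = n then 0 else 1)

-- ===== PRECONDITION & SPEC =====
def Spec_sum_input (user_input : String) (out : Int × Int) : Prop := out = sum_input_alt user_input
instance (user_input : String) (out : Int × Int) : Decidable (Spec_sum_input user_input out) := by unfold Spec_sum_input; infer_instance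

-- ===== CLAIM (what is proved, stated in full; the proofs are below) =====
def Claim_equal_sum_input : Prop := ∀ (user_input : String), Dom_sum_input user_input → Spec_sum_input user_input (sum_input user_input)

-- ===== LEMMAS AND PROOFS =====
theorem foldl_add_shift (g : Char → Int) (l : List Char) (a : Int) :
    l.foldl (fun s c => s + g c) a = a + l.foldl (fun s c => s + g c) 0 := by
  induction l generalizing a with
  | nil => simp
  | cons c rest ih =>
      simp only [List.foldl_cons]
      rw [ih (a + g c), ih (0 + g c)]
      ring

theorem sumInputLoop_eq (l : List Char) (acc : Int) :
    sumInputLoop acc l =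
      (acc + (l.take (digitBoundary l)).foldl (fun s c => s + ((c.toNat : Int) - 48)) 0,
       if digitBoundary l = l.length then 0 else 1) := by
  induction l generalizing acc with
  | nil => simp [sumInputLoop, digitBoundary]
  | cons c rest ih =>
      by_cases h : PySem.Chars.isdigit c = true
      · simp only [sumInputLoop, digitBoundary, h, if_pos]
        rw [ih]
        simp only [List.take_succ_cons, List.foldl_cons, List.length_cons]
        rw [foldl_add_shift _ _ (0 + ((c.toNat : Int) - 48))]
        simp only [Prod.mk.injEq]
        constructor
        · ring
        · simp [Nat.succ_inj]
      · simp [sumInputLoop, digitBoundary, h]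

-- ===== VERDICT (by name: the statement is the Claim_ definition above) =====
theorem sum_input_spec : Claim_equal_sum_input := by
  intro u _
  unfold Spec_sum_input sum_input sum_input_alt
  simp only []
  rw [sumInputLoop_eq]
  simp
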